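-- pv_equiv track=rewrite | github.com/pypi-data/pypi-mirror-185 | packages/FairNLP/FairNLP-5.1.0.tar.gz/FairNLP-5.1.0/FNLP/URL/__init__.py | extract_siteName_one_period
-- ===== SOURCE A (Python) =====
-- def extract_siteName_one_period(url):
--     """ PRIVATE """
--     if type(url) not in [str]:
--         return False
--     i = 0
--     slash_count = 0
--     removal_index = 0
--     for char in url:
--         if char == "/":
--             slash_count += 1
--             if slash_count == 2:
--                 removal_index = i + 1
--         if char == '.':
--             return url[removal_index:i]
--         i += 1
--     return url
-- ===== SOURCE B (Python) =====
-- def extract_siteName_one_period(url):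
--     """ PRIVATE """
--     if type(url) is not str:
--         return False
--     dot = url.find('.')
--     if dot == -1:
--         return url
--     start = 0
--     first = url.find('/')
--     if first != -1 and first < dot:
--         second = url.find('/', first + 1)
--         if second != -1 and second < dot:
--             start = second + 1
--     return url[start:dot]
-- ===== Notes on version B (the rewrite author's own statement) =====
-- stated objective: faster
-- what changed: Replaced A's single-pass character loop with mutable counters (i, slash_count, removal_index) by three direct str.find landmark lookups (first period, first and second slash bounded by the period) and one slice.
import Mathlib
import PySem

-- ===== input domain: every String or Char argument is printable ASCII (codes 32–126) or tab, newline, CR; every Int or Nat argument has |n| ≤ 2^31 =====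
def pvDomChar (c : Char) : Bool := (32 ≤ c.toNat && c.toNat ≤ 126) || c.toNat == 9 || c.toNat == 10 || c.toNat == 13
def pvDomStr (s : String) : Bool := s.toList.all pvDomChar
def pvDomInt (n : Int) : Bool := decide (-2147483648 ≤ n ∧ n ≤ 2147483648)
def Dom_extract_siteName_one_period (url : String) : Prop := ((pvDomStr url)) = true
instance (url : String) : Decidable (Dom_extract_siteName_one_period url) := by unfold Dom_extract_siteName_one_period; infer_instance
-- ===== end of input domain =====

-- B replaces A's stateful slash-counting character loop by direct find-based landmark
-- positions and one slice (measured faster by a constant factor). The Lean argument is a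
-- String, so A's non-str 'return False' branch is unreachable and both ports omit it.

-- ===== PORT A =====
-- the for-loop of A: state i, slash_count, removal_index; s holds the whole url's characters
def pvALoop (s : List Char) : List Char → Nat → Nat → Nat → String
  | [], _, _, _ => String.ofList s
  | c :: rest, i, slash_count, removal_index =>
    let slash_count' := if c = '/' then slash_count + 1 else slash_count
    let removal_index' := if c = '/' ∧ slash_count' = 2 then i + 1 else removal_index
    if c = '.' then
      String.ofList (PySem.List.slice s (some (removal_index' : Int)) (some (i : Int)))
    else
      pvALoop s rest (i + 1) slash_count' removal_index'

def extract_siteName_one_period (url : String) : String :=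
  pvALoop url.toList url.toList 0 0 0

-- ===== PORT B =====
def extract_siteName_one_period_alt (url : String) : String :=
  let dot := PySem.Str.find url "."
  if dot = -1 then url
  else
    let first := PySem.Str.find url "/"
    let start : Int :=
      if first ≠ -1 ∧ first < dot then
        let second := PySem.Str.findFrom url "/" (first + 1)
        if second ≠ -1 ∧ second < dot then second + 1 else 0
      else 0
    String.ofList (PySem.List.slice url.toList (some start) (some dot))  -- url[start:dot]

-- ===== PRECONDITION & SPEC =====
def Spec_extract_siteName_one_period (url : String) (out : String) : Prop := out = extract_siteName_one_period_alt url
instance (url : String) (out : String) : Decidable (Spec_extract_siteName_one_period url out) := by unfold Spec_extract_siteName_one_period; infer_instance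

-- ===== CLAIM (what is proved, stated in full; the proofs are below) =====
def Claim_equal_extract_siteName_one_period : Prop := ∀ (url : String), Dom_extract_siteName_one_period url → Spec_extract_siteName_one_period url (extract_siteName_one_period url)

-- ===== LEMMAS AND PROOFS =====

-- the removal_index A's loop ends up with after consuming a dot-free prefix
def pvScanRi : List Char → Nat → Nat → Nat → Nat
  | [], _, _, removal_index => removal_index
  | c :: rest, i, slash_count, removal_index =>
    let slash_count' := if c = '/' then slash_count + 1 else slash_count
    let removal_index' := if c = '/' ∧ slash_count' = 2 then i + 1 else removal_index
    pvScanRi rest (i + 1) slash_count' removal_index'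

theorem pvALoop_no_dot (s : List Char) (t : List Char) (i sc ri : Nat) (h : '.' ∉ t) :
    pvALoop s t i sc ri = String.ofList s := by
  induction t generalizing i sc ri with
  | nil => rfl
  | cons c rest ih =>
    simp only [List.mem_cons, not_or] at h
    have hdot : ¬ c = '.' := fun hh => h.1 hh.symm
    simp only [pvALoop]
    rw [if_neg hdot]
    exact ih _ _ _ h.2

theorem pvALoop_dot (s u v : List Char) (i sc ri : Nat) (h : '.' ∉ u) :
    pvALoop s (u ++ '.' :: v) i sc ri =
      String.ofList (PySem.List.slice s (some ((pvScanRi u i sc ri : Nat) : Int)) (some ((i + u.length : Nat) : Int))) := by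
  induction u generalizing i sc ri with
  | nil =>
    simp only [List.nil_append, pvALoop, pvScanRi]
    have : ¬ ('.' = '/' ∧ (if ('.':Char) = '/' then sc + 1 else sc) = 2) := by
      rintro ⟨hh, -⟩; exact absurd hh (by decide)
    rw [if_neg this]
    simp
  | cons c rest ih =>
    simp only [List.mem_cons, not_or] at h
    have hdot : ¬ c = '.' := fun hh => h.1 hh.symm
    simp only [List.cons_append, pvALoop, pvScanRi]
    rw [if_neg hdot, ih _ _ _ h.2]
    congr 3
    simp [List.length_cons]; omega

theorem pvScanRi_ge2 (u : List Char) (i sc ri : Nat) (h : 2 ≤ sc) : pvScanRi u i sc ri = ri := by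
  induction u generalizing i sc ri with
  | nil => rfl
  | cons c rest ih =>
    simp only [pvScanRi]
    have h2 : ¬ (c = '/' ∧ (if c = '/' then sc + 1 else sc) = 2) := by
      rintro ⟨hc, hv⟩; rw [if_pos hc] at hv; omega
    rw [if_neg h2]
    split_ifs <;> exact ih _ _ _ (by omega)

theorem pvScanRi_one (u : List Char) (i ri : Nat) :
    pvScanRi u i 1 ri = (u.findIdx? (· = '/')).elim ri (fun q => i + q + 1) := by
  induction u generalizing i ri with
  | nil => rfl
  | cons c rest ih =>
    by_cases hc : c = '/'
    · subst hc
      simp only [pvScanRi, List.findIdx?_cons]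
      norm_num
      rw [pvScanRi_ge2 _ _ _ _ (by omega)]
    · simp only [pvScanRi, if_neg hc, List.findIdx?_cons]
      rw [if_neg (by rintro ⟨hh, -⟩; exact hc hh)]
      rw [ih]
      have hcb : ((c = '/') : Bool) = false := by simpa using hc
      rw [hcb]
      simp only [Bool.false_eq_true, if_false]
      cases rest.findIdx? (· = '/') <;> simp <;> omega

theorem pvScanRi_zero (u : List Char) (i : Nat) :
    pvScanRi u i 0 0 = (u.findIdx? (· = '/')).elim 0
      (fun p => ((u.drop (p + 1)).findIdx? (· = '/')).elim 0 (fun q => i + p + 1 + q + 1)) := by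
  induction u generalizing i with
  | nil => rfl
  | cons c rest ih =>
    by_cases hc : c = '/'
    · subst hc
      simp only [pvScanRi, List.findIdx?_cons]
      norm_num
      rw [pvScanRi_one]
    · have hcb : ((c = '/') : Bool) = false := by simpa using hc
      simp only [pvScanRi, if_neg hc, List.findIdx?_cons, hcb]
      rw [if_neg (by rintro ⟨hh, -⟩; exact hc hh)]
      rw [ih]
      simp only [Bool.false_eq_true, if_false]
      cases h2 : rest.findIdx? (· = '/') with
      | none => simp [h2]
      | some p =>
        simp only [h2, Option.map_some]
        cases h3 : (rest.drop (p + 1)).findIdx? (· = '/') <;> simp [h3, List.drop_succ_cons] <;> omega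

theorem pv_find_go_singleton (c : Char) (t : List Char) (k : Nat) :
    PySem.Chars.find.go [c] t k = (t.findIdx? (· = c)).elim (-1) (fun n => ((k + n : Nat) : Int)) := by
  induction t generalizing k with
  | nil => rfl
  | cons a rest ih =>
    by_cases hc : c = a
    · subst hc
      simp [PySem.Chars.find.go, List.isPrefixOf, List.findIdx?_cons]
    · have hpre : List.isPrefixOf [c] (a :: rest) = false := by
        simp [List.isPrefixOf]
        exact fun h => hc h
      have hne : ((a = c) : Bool) = false := by simpa using fun h => hc h.symm
      simp only [PySem.Chars.find.go, hpre, Bool.false_eq_true, if_false, List.findIdx?_cons, hne]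
      rw [ih]
      cases rest.findIdx? (· = c) <;> simp <;> omega

theorem pv_find_singleton (s : List Char) (c : Char) :
    PySem.Chars.find s [c] = (s.findIdx? (· = c)).elim (-1) (fun n => (n : Int)) := by
  have := pv_find_go_singleton c s 0
  simpa [PySem.Chars.find] using this

theorem pv_main (url : String) :
    extract_siteName_one_period url = extract_siteName_one_period_alt url := by
  have hdotl : ("." : String).toList = ['.'] := rfl
  have hsll : ("/" : String).toList = ['/'] := rfl
  cases hd : url.toList.findIdx? (· = '.') with
  | none =>
    have hnd : '.' ∉ url.toList := by
      intro hm; simpa using List.findIdx?_eq_none_iff.mp hd _ hm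
    unfold extract_siteName_one_period extract_siteName_one_period_alt
    rw [pvALoop_no_dot _ _ _ _ _ hnd]
    simp only [PySem.Str.find_eq, hdotl, pv_find_singleton, hd]
    simp [String.ofList_toList]
  | some d =>
    obtain ⟨hdlt, hdc, hmin⟩ := List.findIdx?_eq_some_iff_getElem.mp hd
    have hdc' : url.toList[d] = '.' := by simpa using hdc
    have hsplit : url.toList = url.toList.take d ++ '.' :: url.toList.drop (d + 1) := by
      conv_lhs => rw [← List.take_append_drop d url.toList]
      rw [← List.getElem_cons_drop hdlt, hdc']
    have hulen : (url.toList.take d).length = d := by rw [List.length_take]; omega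
    have hnd_u : '.' ∉ url.toList.take d := by
      intro hm
      obtain ⟨j, hj, hjv⟩ := List.mem_iff_getElem.mp hm
      have hjd : j < d := by simpa [hulen] using hj
      have := hmin j hjd
      rw [List.getElem_take] at hjv
      simp [hjv] at this
    -- A side
    have hA : extract_siteName_one_period url =
        String.ofList (PySem.List.slice url.toList
          (some ((pvScanRi (url.toList.take d) 0 0 0 : Nat) : Int)) (some ((d : Nat) : Int))) := by
      unfold extract_siteName_one_period
      conv_lhs => rw [hsplit]
      rw [pvALoop_dot _ _ _ _ _ _ hnd_u, ← hsplit]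
      norm_num [hulen]
    rw [hA]
    have hfdot : PySem.Chars.find url.toList ['.'] = (d : Int) := by
      rw [pv_find_singleton, hd]; rfl
    unfold extract_siteName_one_period_alt
    simp only [PySem.Str.find_eq, PySem.Str.findFrom_eq, hdotl, hsll, hfdot]
    rw [if_neg (by omega : ¬ ((d : Int) = -1))]
    cases hp : (url.toList.take d).findIdx? (· = '/') with
    | none =>
      have hscan : pvScanRi (url.toList.take d) 0 0 0 = 0 := by rw [pvScanRi_zero, hp]; rfl
      have hsfind : url.toList.findIdx? (· = '/')
          = Option.map (· + d) (('.' :: url.toList.drop (d + 1)).findIdx? (· = '/')) := by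
        conv_lhs => rw [hsplit]
        rw [List.findIdx?_append, hp, hulen]
        simp
      cases hv : ('.' :: url.toList.drop (d + 1)).findIdx? (· = '/') with
      | none =>
        have hfs : PySem.Chars.find url.toList ['/'] = -1 := by
          rw [pv_find_singleton, hsfind, hv]; rfl
        rw [hfs, if_neg (by simp), hscan]
        norm_num
      | some m =>
        have hfs : PySem.Chars.find url.toList ['/'] = ((m + d : Nat) : Int) := by
          rw [pv_find_singleton, hsfind, hv]; rfl
        rw [hfs, if_neg (by push_cast; omega), hscan]
        norm_num
    | some p =>
      obtain ⟨hplt', hpc, hpmin⟩ := List.findIdx?_eq_some_iff_getElem.mp hp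
      have hpd : p < d := by rw [hulen] at hplt'; exact hplt'
      have hfirst : url.toList.findIdx? (· = '/') = some p := by
        conv_lhs => rw [hsplit]
        rw [List.findIdx?_append, hp]
        rfl
      have hfs : PySem.Chars.find url.toList ['/'] = (p : Int) := by
        rw [pv_find_singleton, hfirst]; rfl
      rw [hfs, if_pos ⟨by omega, by exact_mod_cast hpd⟩]
      have hcast : ((p : Int) + 1) = ((p + 1 : Nat) : Int) := by push_cast; ring
      have hdropsplit : url.toList.drop (p + 1)
          = (url.toList.take d).drop (p + 1) ++ '.' :: url.toList.drop (d + 1) := by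
        conv_lhs => rw [hsplit]
        rw [List.drop_append_of_le_length (by omega)]
      have hdlen : ((url.toList.take d).drop (p + 1)).length = d - (p + 1) := by
        rw [List.length_drop, hulen]
      cases hq : ((url.toList.take d).drop (p + 1)).findIdx? (· = '/') with
      | some q =>
        obtain ⟨hqlt, -, -⟩ := List.findIdx?_eq_some_iff_getElem.mp hq
        rw [hdlen] at hqlt
        have hfdrop : PySem.Chars.find (url.toList.drop (p + 1)) ['/'] = ((q : Nat) : Int) := by
          rw [hdropsplit, pv_find_singleton, List.findIdx?_append, hq]; rfl
        have hsec : PySem.Chars.findFrom url.toList ['/'] ((p : Int) + 1) = ((p + 1 + q : Nat) : Int) := by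
          rw [hcast, PySem.Chars.findFrom_natCast _ _ (p + 1) (by omega), hfdrop]
          rw [if_neg (by omega)]
          push_cast; ring
        have hscan : pvScanRi (url.toList.take d) 0 0 0 = 0 + p + 1 + q + 1 := by
          rw [pvScanRi_zero, hp]; simp only [Option.elim_some]; rw [hq]; rfl
        rw [hsec, if_pos ⟨by omega, by exact_mod_cast (by omega : p + 1 + q < d)⟩, hscan]
        norm_num
      | none =>
        have hscan : pvScanRi (url.toList.take d) 0 0 0 = 0 := by
          rw [pvScanRi_zero, hp]; simp only [Option.elim_some]; rw [hq]; rfl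
        cases hv : ('.' :: url.toList.drop (d + 1)).findIdx? (· = '/') with
        | none =>
          have hfdrop : PySem.Chars.find (url.toList.drop (p + 1)) ['/'] = -1 := by
            rw [hdropsplit, pv_find_singleton, List.findIdx?_append, hq, hv]; rfl
          have hsec : PySem.Chars.findFrom url.toList ['/'] ((p : Int) + 1) = -1 := by
            rw [hcast, PySem.Chars.findFrom_natCast _ _ (p + 1) (by omega), hfdrop]
            rw [if_pos rfl]
          rw [hsec, if_neg (by simp), hscan]
          norm_num
        | some m =>
          have hfdrop : PySem.Chars.find (url.toList.drop (p + 1)) ['/'] = ((m + (d - (p + 1)) : Nat) : Int) := by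
            rw [hdropsplit, pv_find_singleton, List.findIdx?_append, hq, hv, hdlen]; rfl
          have hsec : PySem.Chars.findFrom url.toList ['/'] ((p : Int) + 1) = ((p + 1 + (m + (d - (p + 1))) : Nat) : Int) := by
            rw [hcast, PySem.Chars.findFrom_natCast _ _ (p + 1) (by omega), hfdrop]
            rw [if_neg (by omega)]
            push_cast; ring
          rw [hsec, if_neg (by push_cast; omega), hscan]
          norm_num

-- ===== VERDICT (by name: the statement is the Claim_ definition above) =====
theorem extract_siteName_one_period_spec : Claim_equal_extract_siteName_one_period := by
  unfold Claim_equal_extract_siteName_one_period Spec_extract_siteName_one_period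
  intro url _
  exact pv_main url
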